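-- pv_equiv track=rewrite | github.com/elliotwutingfeng/fasttld | fasttld/FastTLDExtract.py | index_last_char_before
-- ===== SOURCE A (Python) =====
-- def index_last_char_before(s, b, not_after_chars):
--     """index_last_char_before returns the index of the last instance of char b
--     before any char in not_after_chars, otherwise -1
--     """
--     idx = -1
--     for i, c in enumerate(s):
--         if c in not_after_chars:
--             break
--         if c == b:
--             idx = i
--     return idx
-- ===== SOURCE B (Python) =====
-- def index_last_char_before(s, b, not_after_chars):
--     cutoff = len(s)
--     for i, c in enumerate(s):
--         if c in not_after_chars:
--             cutoff = i
--             break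
--     for i in range(cutoff - 1, -1, -1):
--         if s[i] == b:
--             return i
--     return -1
-- ===== Notes on version B (the rewrite author's own statement) =====
-- stated objective: alternative
-- what changed: Instead of one forward pass tracking the last match, B first finds the cutoff (index of the first forbidden char, or len(s)) and then scans backward from cutoff-1 returning the first single-character match.
import Mathlib
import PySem

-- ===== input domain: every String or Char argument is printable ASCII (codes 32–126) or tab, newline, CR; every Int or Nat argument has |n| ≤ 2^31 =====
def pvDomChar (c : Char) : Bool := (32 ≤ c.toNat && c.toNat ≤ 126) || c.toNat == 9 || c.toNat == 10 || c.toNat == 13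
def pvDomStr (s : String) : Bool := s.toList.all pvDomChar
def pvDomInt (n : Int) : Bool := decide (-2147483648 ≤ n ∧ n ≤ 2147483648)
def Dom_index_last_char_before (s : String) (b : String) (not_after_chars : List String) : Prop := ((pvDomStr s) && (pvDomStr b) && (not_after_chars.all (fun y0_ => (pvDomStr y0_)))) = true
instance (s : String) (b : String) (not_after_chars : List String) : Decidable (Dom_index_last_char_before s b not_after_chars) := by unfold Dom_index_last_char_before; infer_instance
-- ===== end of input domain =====

-- B replaces A's single forward last-match pass by: find the cutoff (first forbidden char, or len(s)),
-- then scan backward from cutoff-1 for the first single-character match (objective: alternative decomposition).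

-- ===== PORT A =====
-- forward loop: break on forbidden char, remember last index where c == b
def aLoop (b : String) (nac : List String) : List Char → Int → Int → Int
  | [], _, idx => idx
  | c :: rest, i, idx =>
    if nac.contains (String.ofList [c]) then idx
    else aLoop b nac rest (i + 1) (if String.ofList [c] == b then i else idx)

def index_last_char_before (s : String) (b : String) (not_after_chars : List String) : Int :=
  aLoop b not_after_chars s.toList 0 (-1)

-- ===== PORT B =====
-- first loop of Source B: index of the first forbidden char, defaulting to len(s)
def findCutoff (nac : List String) : List Char → Nat → Nat
  | [], i => i
  | c :: rest, i => if nac.contains (String.ofList [c]) then i else findCutoff nac rest (i + 1)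

-- second loop of Source B: for i in range(m-1, -1, -1): if s[i] == b: return i  (indices are in range, so getD is exact)
def backScan (cs : List Char) (b : String) : Nat → Int
  | 0 => -1
  | n + 1 => if String.ofList [cs.getD n ' '] == b then (n : Int) else backScan cs b n

def index_last_char_before_alt (s : String) (b : String) (not_after_chars : List String) : Int :=
  backScan s.toList b (findCutoff not_after_chars s.toList 0)

-- ===== PRECONDITION & SPEC =====
def Spec_index_last_char_before (s : String) (b : String) (not_after_chars : List String) (out : Int) : Prop := out = index_last_char_before_alt s b not_after_chars
instance (s : String) (b : String) (not_after_chars : List String) (out : Int) : Decidable (Spec_index_last_char_before s b not_after_chars out) := by unfold Spec_index_last_char_before; infer_instance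

-- ===== CLAIM (what is proved, stated in full; the proofs are below) =====
def Claim_equal_index_last_char_before : Prop := ∀ (s : String) (b : String) (not_after_chars : List String), Dom_index_last_char_before s b not_after_chars → Spec_index_last_char_before s b not_after_chars (index_last_char_before s b not_after_chars)

-- ===== LEMMAS AND PROOFS =====

-- findCutoff with offset
theorem findCutoff_shift (nac : List String) (cs : List Char) (i : Nat) :
    findCutoff nac cs i = i + findCutoff nac cs 0 := by
  induction cs generalizing i with
  | nil => simp [findCutoff]
  | cons c rest ih =>
    simp only [findCutoff]
    split
    · simp
    · rw [ih (i + 1), ih 1]; omega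

theorem findCutoff_le_length (nac : List String) (cs : List Char) :
    findCutoff nac cs 0 ≤ cs.length := by
  induction cs with
  | nil => simp [findCutoff]
  | cons c rest ih =>
    simp only [findCutoff]
    split
    · simp
    · rw [findCutoff_shift]; simp; omega

-- forbidden-free forward loop (A's loop restricted to the prefix before the cutoff)
def fwd (b : String) : List Char → Int → Int → Int
  | [], _, idx => idx
  | c :: rest, i, idx => fwd b rest (i + 1) (if String.ofList [c] == b then i else idx)

theorem aLoop_eq_fwd_take (b : String) (nac : List String) (cs : List Char) (i idx : Int) :
    aLoop b nac cs i idx = fwd b (cs.take (findCutoff nac cs 0)) i idx := by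
  induction cs generalizing i idx with
  | nil => simp [aLoop, findCutoff, fwd]
  | cons c rest ih =>
    simp only [aLoop, findCutoff]
    split
    · simp [fwd]
    · rw [findCutoff_shift, ih, Nat.add_comm, List.take_succ_cons]
      simp [fwd]

theorem fwd_snoc (b : String) (l : List Char) (c : Char) (i idx : Int) :
    fwd b (l ++ [c]) i idx =
      if String.ofList [c] == b then i + l.length else fwd b l i idx := by
  induction l generalizing i idx with
  | nil => simp [fwd]
  | cons d rest ih =>
    simp only [List.cons_append, fwd, ih]
    split
    · simp; omega
    · rfl

theorem backScan_congr (b : String) (l l' : List Char) (m : Nat)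
    (h : ∀ j < m, l.getD j ' ' = l'.getD j ' ') :
    backScan l b m = backScan l' b m := by
  induction m with
  | zero => rfl
  | succ n ih =>
    simp only [backScan]
    rw [h n (by omega), ih (fun j hj => h j (by omega))]

theorem backScan_append (l : List Char) (c : Char) (b : String) (m : Nat) (hm : m ≤ l.length) :
    backScan (l ++ [c]) b m = backScan l b m := by
  induction m with
  | zero => rfl
  | succ n ih =>
    simp only [backScan]
    rw [List.getD_append (h := by omega), ih (by omega)]

theorem fwd_eq_backScan (b : String) (t : List Char) (idx : Int) :
    fwd b t 0 idx =
      (if backScan t b t.length = -1 then idx else backScan t b t.length) := by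
  induction t using List.reverseRecOn generalizing idx with
  | nil => simp [fwd, backScan]
  | append_singleton l c ih =>
    rw [fwd_snoc]
    have hlen : (l ++ [c]).length = l.length + 1 := by simp
    rw [hlen]
    simp only [backScan]
    rw [List.getD_append_right (h := by omega)]
    simp only [Nat.sub_self, List.getD_cons_zero]
    rw [backScan_append l c b l.length (le_refl _)]
    split
    · have : (l.length : Int) ≠ -1 := by omega
      simp [this]
    · rw [ih]

theorem index_last_char_before_eq (s : String) (b : String) (nac : List String) :
    index_last_char_before s b nac = index_last_char_before_alt s b nac := by
  unfold index_last_char_before index_last_char_before_alt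
  set cs := s.toList
  set m := findCutoff nac cs 0 with hm
  rw [aLoop_eq_fwd_take, ← hm, fwd_eq_backScan]
  have hml : m ≤ cs.length := findCutoff_le_length nac cs
  have htake : (cs.take m).length = m := by simp [hml]
  have hbs : backScan (cs.take m) b m = backScan cs b m := by
    apply backScan_congr
    intro j hj
    unfold List.getD
    rw [List.getElem?_take_of_lt hj]
  rw [htake, hbs]
  split
  · rename_i h
    exact h.symm
  · rfl

-- ===== VERDICT (by name: the statement is the Claim_ definition above) =====
theorem index_last_char_before_spec : Claim_equal_index_last_char_before := by
  intro s b nac _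
  unfold Spec_index_last_char_before
  exact index_last_char_before_eq s b nac
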